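-- pv_equiv track=rewrite | github.com/gridvisi/Python_workspace | 3 codewars/7 kyu/7 kyu Mr Martingale.py | martingale
-- ===== SOURCE A (Python) =====
-- def martingale(bank, outcomes):
--     #prices = [100,100]+[100*2**i for i in range(len(outcomes))]
--     bet,res = 100,0
--     for i, e in enumerate(outcomes):
--         if e == 0:
--             res -= bet
--             bet *= 2
--             #outcomes[i+1] = 2*outcomes[i]
--         else:
--             res += bet
--             bet = 100
--             #outcomes[i+1] = 100
--     #rate = [2*outcomes[i+1] else i for i,e in enumerate(outcomes)]
--
--     return bank + res
-- ===== SOURCE B (Python) =====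
-- def martingale(bank, outcomes):
--     wins = sum(1 for e in outcomes if e != 0)
--     tail = 0
--     for e in reversed(outcomes):
--         if e != 0:
--             break
--         tail += 1
--     return bank + 100 * wins - 100 * (2 ** tail - 1)
-- ===== Notes on version B (the rewrite author's own statement) =====
-- stated objective: alternative
-- what changed: Instead of simulating a running doubling bet and balance in one stateful loop, B counts the wins over the whole list and measures the trailing loss streak by scanning the list from the back, then returns bank + 100*wins - 100*(2**tail - 1) in closed form.
import Mathlib
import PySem

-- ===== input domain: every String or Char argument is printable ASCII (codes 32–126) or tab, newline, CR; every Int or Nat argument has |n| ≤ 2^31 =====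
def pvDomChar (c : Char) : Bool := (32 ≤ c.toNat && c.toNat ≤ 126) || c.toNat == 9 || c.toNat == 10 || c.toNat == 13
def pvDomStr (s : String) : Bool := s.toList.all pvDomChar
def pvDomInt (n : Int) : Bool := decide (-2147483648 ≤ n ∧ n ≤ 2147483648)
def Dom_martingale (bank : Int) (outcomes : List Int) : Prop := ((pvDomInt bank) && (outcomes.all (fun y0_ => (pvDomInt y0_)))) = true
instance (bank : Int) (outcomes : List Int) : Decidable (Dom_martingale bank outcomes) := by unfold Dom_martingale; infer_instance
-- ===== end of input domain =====

-- B replaces A's stateful bet/balance simulation by counting wins plus a backward scan for the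
-- trailing loss streak and a closed-form payout (alternative decomposition; return value only).
-- ===== PORT A =====
def martingale (bank : Int) (outcomes : List Int) : Int :=
  -- bet,res = 100,0; for e in outcomes: …  (enumerate index i is unused in A)
  let st := outcomes.foldl
    (fun (p : Int × Int) e =>
      if e == 0 then (p.1 * 2, p.2 - p.1) else (100, p.2 + p.1))
    (100, 0)
  bank + st.2

-- ===== PORT B =====
def martingale_alt (bank : Int) (outcomes : List Int) : Int :=
  -- wins = sum(1 for e in outcomes if e != 0)
  let wins : Int := (outcomes.filter (fun e => !(e == 0))).length
  -- tail = leading zeros of reversed(outcomes) (loop with break)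
  let tail : Nat := (outcomes.reverse.takeWhile (fun e => e == 0)).length
  bank + 100 * wins - 100 * (2 ^ tail - 1)

-- ===== PRECONDITION & SPEC =====
def Spec_martingale (bank : Int) (outcomes : List Int) (out : Int) : Prop := out = martingale_alt bank outcomes
instance (bank : Int) (outcomes : List Int) (out : Int) : Decidable (Spec_martingale bank outcomes out) := by unfold Spec_martingale; infer_instance

-- ===== CLAIM (what is proved, stated in full; the proofs are below) =====
def Claim_equal_martingale : Prop := ∀ (bank : Int) (outcomes : List Int), Dom_martingale bank outcomes → Spec_martingale bank outcomes (martingale bank outcomes)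

-- ===== LEMMAS AND PROOFS =====

-- proof-internal counter fold: (wins so far, current loss streak)
def pvWS (l : List Int) (w : Int) (s : Nat) : Int × Nat :=
  l.foldl (fun (p : Int × Nat) e => if e == 0 then (p.1, p.2 + 1) else (p.1 + 1, 0)) (w, s)

-- loop invariant: A's (bet,res) after a prefix equals (100*2^streak, 100*wins - 100*(2^streak-1))
lemma martingale_inv (l : List Int) (w : Int) (s : Nat) :
    (l.foldl
      (fun (p : Int × Int) e =>
        if e == 0 then (p.1 * 2, p.2 - p.1) else (100, p.2 + p.1))
      (100 * 2 ^ s, 100 * w - 100 * (2 ^ s - 1))).2 =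
    100 * (pvWS l w s).1 - 100 * ((2 : Int) ^ (pvWS l w s).2 - 1) := by
  induction l generalizing w s with
  | nil => simp [pvWS]
  | cons e t ih =>
    by_cases he : e = 0
    · simp only [pvWS, List.foldl_cons, he, beq_self_eq_true, if_true]
      have h1 : (100 : Int) * 2 ^ s * 2 = 100 * 2 ^ (s + 1) := by ring
      have h2 : (100 : Int) * w - 100 * (2 ^ s - 1) - 100 * 2 ^ s
          = 100 * w - 100 * (2 ^ (s + 1) - 1) := by ring
      rw [h1, h2]; exact ih w (s + 1)
    · have hne : (e == 0) = false := by simpa using he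
      simp only [pvWS, List.foldl_cons, hne, Bool.false_eq_true, if_false]
      have key : ((100 : Int), 100 * w - 100 * (2 ^ s - 1) + 100 * 2 ^ s)
          = (100 * 2 ^ (0 : Nat), 100 * (w + 1) - 100 * ((2 : Int) ^ (0 : Nat) - 1)) := by
        norm_num; ring
      rw [key]; exact ih (w + 1) 0

-- first component of the counter fold counts the nonzero elements
lemma pvWS_fst (l : List Int) (w : Int) (s : Nat) :
    (pvWS l w s).1 = w + (l.filter (fun e => !(e == 0))).length := by
  induction l generalizing w s with
  | nil => simp [pvWS]
  | cons e t ih =>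
    by_cases he : e = 0
    · have hb : (e == 0) = true := by simpa using he
      simp only [pvWS, List.foldl_cons, hb, if_true, List.filter_cons, Bool.not_true,
        Bool.false_eq_true, if_false]
      exact (by simpa [pvWS] using ih w (s + 1))
    · have hne : (e == 0) = false := by simpa using he
      simp only [pvWS, List.foldl_cons, hne, Bool.false_eq_true, if_false,
        List.filter_cons, Bool.not_false, if_true, List.length_cons]
      have := ih (w + 1) 0
      simp only [pvWS] at this
      rw [this]; push_cast; ring

-- if t has a nonzero element, its reversed zero-prefix is shorter than t
lemma pv_tw_ne (t : List Int) (hall : ¬ (t.all (fun e => e == 0)) = true) :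
    (t.reverse.takeWhile (fun e => e == 0)).length ≠ t.length := by
  intro hlen
  have hpre := List.takeWhile_prefix (p := fun e : Int => (e == 0)) (l := t.reverse)
  have heq : t.reverse.takeWhile (fun e => e == 0) = t.reverse :=
    hpre.eq_of_length (by simpa using hlen)
  apply hall
  rw [List.all_eq_true]
  intro x hx
  have hx' : x ∈ List.takeWhile (fun e : Int => e == 0) t.reverse := by
    rw [heq]; exact List.mem_reverse.mpr hx
  exact List.mem_takeWhile_imp (p := fun e : Int => e == 0) (l := t.reverse) hx'

-- second component: final streak = trailing zeros (or s + length if all zero)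
lemma pvWS_snd (l : List Int) (w : Int) (s : Nat) :
    (pvWS l w s).2 =
      if l.all (fun e => e == 0) then s + l.length
      else (l.reverse.takeWhile (fun e => e == 0)).length := by
  induction l generalizing w s with
  | nil => simp [pvWS]
  | cons e t ih =>
    by_cases he : e = 0
    · have hb : (e == 0) = true := by simpa using he
      simp only [pvWS, List.foldl_cons, hb, if_true]
      have hih := ih w (s + 1)
      simp only [pvWS] at hih
      rw [hih]
      by_cases hall : t.all (fun e => e == 0)
      · have hc : (e :: t).all (fun e => e == 0) = true := by simp [hb, hall]
        simp [hall, hc]; omega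
      · have hc : (e :: t).all (fun e => e == 0) = false := by simp [List.all_cons, hall]
        simp only [hall, if_false, hc, Bool.false_eq_true]
        rw [List.reverse_cons, List.takeWhile_append]
        simp only [List.length_reverse]
        rw [if_neg (pv_tw_ne t hall)]
    · have hb : (e == 0) = false := by simpa using he
      simp only [pvWS, List.foldl_cons, hb, Bool.false_eq_true, if_false]
      have hih := ih (w + 1) 0
      simp only [pvWS] at hih
      rw [hih]
      have hc : (e :: t).all (fun e => e == 0) = false := by simp [List.all_cons, hb]
      simp only [hc, Bool.false_eq_true, if_false]
      by_cases hall : t.all (fun e => e == 0)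
      · simp only [hall, if_true, Nat.zero_add]
        have hrev : t.reverse.takeWhile (fun e => e == 0) = t.reverse := by
          apply List.takeWhile_eq_self_iff.mpr
          intro x hx
          rw [List.mem_reverse] at hx
          simpa using (List.all_eq_true.mp hall x hx)
        rw [List.reverse_cons, List.takeWhile_append]
        simp [hrev, hb]
      · simp only [hall, if_false, Bool.false_eq_true]
        rw [List.reverse_cons, List.takeWhile_append]
        simp only [List.length_reverse]
        rw [if_neg (pv_tw_ne t hall)]

-- ===== VERDICT (by name: the statement is the Claim_ definition above) =====
theorem martingale_spec : Claim_equal_martingale := by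
  intro bank outcomes _
  show bank + (outcomes.foldl
      (fun (p : Int × Int) e =>
        if e == 0 then (p.1 * 2, p.2 - p.1) else (100, p.2 + p.1)) (100, 0)).2
    = bank + 100 * ((outcomes.filter (fun e => !(e == 0))).length : Int)
      - 100 * ((2 : Int) ^ (outcomes.reverse.takeWhile (fun e => e == 0)).length - 1)
  have h := martingale_inv outcomes 0 0
  simp only [pow_zero, mul_one, mul_zero, sub_self] at h
  rw [h, pvWS_fst outcomes 0 0, pvWS_snd outcomes 0 0]
  by_cases hall : outcomes.all (fun e => e == 0)
  · have hrev : outcomes.reverse.takeWhile (fun e => e == 0) = outcomes.reverse := by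
      apply List.takeWhile_eq_self_iff.mpr
      intro x hx
      rw [List.mem_reverse] at hx
      simpa using (List.all_eq_true.mp hall x hx)
    simp only [hall, if_true, hrev, List.length_reverse]
    ring
  · simp only [hall, if_false, Bool.false_eq_true]
    ring
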